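-- pv_equiv track=rewrite | github.com/Kdonghs/algorithm | 프로그래머스/Lv.2 [3차]n진수 게임/동혁/[3차]n진수 게임.py | solution
-- ===== SOURCE A (Python) =====
-- def convert(number, n):
--     if number == 0:
--         return '0'
--     NUMBERS = "0123456789ABCDEF"
--     res = ""
--     while number > 0:
--         number, mod = divmod(number, n)
--         res += NUMBERS[mod]
--     return res[::-1]
--
-- def solution(n, t, m, p):
--     answer = ''
--     words = ''
--     p = p - 1
--
--     for num in range(t * m):
--         words += convert(num, n)
--
--     while 1:
--         if len(answer) == t:
--             break
--
--         answer += words[p]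
--         p += m
--     return answer
-- ===== SOURCE B (Python) =====
-- def solution(n, t, m, p):
--     # Single streaming pass: emit base-n digits of 0,1,2,... and pick every
--     # m-th global position starting at p-1, stopping once t digits are taken.
--     if t <= 0:
--         return ''
--     DIGITS = "0123456789ABCDEF"
--     res = []
--     want = p - 1   # next global digit position to take
--     idx = 0        # global position of the next streamed digit
--     num = 0
--     while True:
--         x, ds = num, ''
--         while x > 0:
--             ds = DIGITS[x % n] + ds
--             x //= n
--         if num == 0:
--             ds = '0'
--         for c in ds:
--             if idx == want:
--                 res.append(c)
--                 if len(res) == t: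
--                     return ''.join(res)
--                 want += m
--             idx += 1
--         num += 1
-- ===== Notes on version B (the rewrite author's own statement) =====
-- stated objective: alternative
-- what changed: Instead of materializing the full digit string for all t*m numbers and then jumping through it by index, B does one streaming pass: it emits base-n digits of 0,1,2,... left-to-right, keeps a running global position and the next wanted position (p-1, then +m each pick), and stops as soon as t digits are collected.
-- outside the precondition, e.g. on solution(2, 1, 2, -1): A returns '0', B does not finish within the time limit
import Mathlib
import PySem

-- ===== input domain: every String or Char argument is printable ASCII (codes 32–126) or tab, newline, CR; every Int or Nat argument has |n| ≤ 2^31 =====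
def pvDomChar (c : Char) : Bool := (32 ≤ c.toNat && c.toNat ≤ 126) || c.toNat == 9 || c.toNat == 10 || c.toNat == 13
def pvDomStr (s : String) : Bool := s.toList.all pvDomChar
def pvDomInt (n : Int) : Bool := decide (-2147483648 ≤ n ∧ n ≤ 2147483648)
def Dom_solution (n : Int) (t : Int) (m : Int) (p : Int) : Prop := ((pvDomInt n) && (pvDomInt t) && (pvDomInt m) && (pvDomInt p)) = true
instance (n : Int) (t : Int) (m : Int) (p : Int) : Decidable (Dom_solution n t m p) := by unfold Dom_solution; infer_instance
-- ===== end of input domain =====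

-- B replaces A's build-the-whole-digit-string-then-index-jump with a single streaming pass that
-- picks every m-th digit on the fly and stops once t digits are collected (alternative decomposition, same cost).


-- ===== PORT A =====
-- NUMBERS = "0123456789ABCDEF" (shared literal of both Pythons)
def pvNUMBERS : String := "0123456789ABCDEF"

-- body of convert's `while number > 0` loop (strings carried as List Char via PySem.Chars);
-- fuel number.toNat+1 suffices: each iteration floor-divides a positive number by n ≥ 2
def convertAux (fuel : Nat) (number : Int) (n : Int) (res : List Char) : List Char :=
  match fuel with
  | 0 => res
  | f + 1 =>
    if 0 < number then
      match PySem.Int.divmod? number n with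
      | none => res                                 -- ZeroDivisionError (n = 0): outside Pre_
      | some qr =>
        match PySem.Str.pyGet? pvNUMBERS qr.2 with
        | none => res                               -- IndexError on NUMBERS[mod]: outside Pre_
        | some c => convertAux f qr.1 n (res ++ [c])
    else res

def convert (number : Int) (n : Int) : List Char :=
  if number = 0 then ['0']
  else (convertAux (number.toNat + 1) number n []).reverse   -- res[::-1]

-- words += convert(num, n) over range(t*m)
def wordsA (n : Int) (t : Int) (m : Int) : List Char :=
  (PySem.List.pyRange 0 (t * m) 1).foldl (fun w num => w ++ convert num n) []

-- `while 1:` answer loop; it adds one char per iteration, so fuel t.toNat+1 suffices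
def aLoop (fuel : Nat) (words : List Char) (answer : List Char) (t : Int) (p : Int) (m : Int) : List Char :=
  match fuel with
  | 0 => answer
  | f + 1 =>
    if (answer.length : Int) = t then answer
    else
      match PySem.List.pyGet? words p with
      | none => answer                              -- IndexError on words[p]: outside Pre_
      | some c => aLoop f words (answer ++ [c]) t (p + m) m

def solution (n : Int) (t : Int) (m : Int) (p : Int) : String :=
  String.ofList (aLoop (t.toNat + 1) (wordsA n t m) [] t (p - 1) m)

-- ===== PORT B =====
-- inner digit loop of Source B: ds = DIGITS[x % n] + ds; x //= n
def bDigitsAux (fuel : Nat) (x : Int) (n : Int) (ds : List Char) : List Char :=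
  match fuel with
  | 0 => ds
  | f + 1 =>
    if 0 < x then
      match PySem.Str.pyGet? pvNUMBERS (PySem.Int.mod x n) with
      | none => ds                                  -- IndexError: outside Pre_
      | some c => bDigitsAux f (PySem.Int.floordiv x n) n (c :: ds)
    else ds

-- the `for c in ds` loop with its early `return ''.join(res)`:
-- .inl done = function returned, .inr = continue the outer loop with the new state
def bInner (cs : List Char) (res : List Char) (want : Int) (idx : Int) (t : Int) (m : Int) :
    Sum (List Char) (List Char × Int × Int) :=
  match cs with
  | [] => Sum.inr (res, want, idx)
  | c :: rest =>
    if idx = want then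
      if ((res ++ [c]).length : Int) = t then Sum.inl (res ++ [c])
      else bInner rest (res ++ [c]) (want + m) (idx + 1) t m
    else bInner rest res want (idx + 1) t m

-- the `while True` outer loop; whenever the Python loop returns, it does so before num exceeds the
-- last wanted position p-1+(t-1)*m, so the fuel passed below ((p-1).toNat + t.toNat*m.toNat + 1) suffices
def bLoop (fuel : Nat) (num : Int) (res : List Char) (want : Int) (idx : Int)
    (n : Int) (t : Int) (m : Int) : List Char :=
  match fuel with
  | 0 => res                                        -- unreachable under Pre_ with the fuel given
  | f + 1 =>
    let ds0 := bDigitsAux (num.toNat + 1) num n []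
    let ds := if num = 0 then ['0'] else ds0
    match bInner ds res want idx t m with
    | Sum.inl done => done
    | Sum.inr s => bLoop f (num + 1) s.1 s.2.1 s.2.2 n t m

def solution_alt (n : Int) (t : Int) (m : Int) (p : Int) : String :=
  if t ≤ 0 then ""
  else String.ofList (bLoop ((p - 1).toNat + t.toNat * m.toNat + 1) 0 [] (p - 1) 0 n t m)

-- ===== PRECONDITION & SPEC =====
-- exact length of A's concatenated digit string `words` for 0..k-1 in base n (2 ≤ n ≤ 16, k ≤ 2^62):
-- one digit per number plus one extra for each j ≥ 1 and each number ≥ n^j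
def wordsLen (n : Int) (k : Int) : Int := k + ∑ j ∈ Finset.Icc 1 62, max (k - n ^ j) 0

-- Pre_ admits exactly the inputs on which A returns through nonnegative indexing: t = 0, the trivial
-- t = m = p = 1 case (any n), or 1 ≤ t, m, p with every NUMBERS index valid (2 ≤ n ≤ 16; n ≥ 17 with
-- t*m ≤ 16; -17 ≤ n ≤ -1) and the last picked position p-1+(t-1)*m inside `words`, whose exact length
-- is wordsLen n (t*m) (resp. t*m in the one-digit regions); excluded are only inputs where A raises
-- (IndexError/ZeroDivisionError), diverges (n = 1), or returns solely via negative-index wraparound of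
-- words[p] (p ≤ 0), where B streams forever.
def Pre_solution (n : Int) (t : Int) (m : Int) (p : Int) : Prop :=
  t = 0 ∨
  (t = 1 ∧ m = 1 ∧ p = 1) ∨
  (2 ≤ n ∧ n ≤ 16 ∧ 1 ≤ t ∧ 1 ≤ m ∧ 1 ≤ p ∧ p - 1 + (t - 1) * m < wordsLen n (t * m)) ∨
  (17 ≤ n ∧ t * m ≤ 16 ∧ 1 ≤ t ∧ 1 ≤ m ∧ 1 ≤ p ∧ p - 1 + (t - 1) * m < t * m) ∨
  (-17 ≤ n ∧ n ≤ -1 ∧ 1 ≤ t ∧ 1 ≤ m ∧ 1 ≤ p ∧ p - 1 + (t - 1) * m < t * m)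
instance (n : Int) (t : Int) (m : Int) (p : Int) : Decidable (Pre_solution n t m p) := by
  unfold Pre_solution; infer_instance

def pvWitness_solution : Int × Int × Int × Int := (2, 4, 3, 1)

def Spec_solution (n : Int) (t : Int) (m : Int) (p : Int) (out : String) : Prop := out = solution_alt n t m p
instance (n : Int) (t : Int) (m : Int) (p : Int) (out : String) : Decidable (Spec_solution n t m p out) := by unfold Spec_solution; infer_instance

-- ===== CLAIM (what is proved, stated in full; the proofs are below) =====
def Claim_equal_solution : Prop := ∀ (n : Int) (t : Int) (m : Int) (p : Int), Dom_solution n t m p → Pre_solution n t m p → Spec_solution n t m p (solution n t m p)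

-- ===== LEMMAS AND PROOFS =====

-- low-order-first digit list both digit loops compute (proof-side reference)
def digitsRec : Nat → Int → Int → List Char
  | 0, _, _ => []
  | f + 1, x, n =>
    if 0 < x then
      match PySem.Int.divmod? x n with
      | none => []
      | some qr =>
        match PySem.Str.pyGet? pvNUMBERS qr.2 with
        | none => []
        | some c => c :: digitsRec f qr.1 n
    else []

-- concatenation of the digit strings of 0,…,k-1 (A's `words` is streamN n (t*m).toNat)
def streamN (n : Int) (k : Nat) : List Char :=
  (List.range k).flatMap (fun i => convert (i : Int) n)

-- every m-th character of W starting at pos, k picks (the common value of both programs)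
def sel (W : List Char) (m : Int) (pos : Int) : Nat → List Char
  | 0 => []
  | k + 1 => PySem.List.pyGetD W pos ' ' :: sel W m (pos + m) k

theorem convertAux_eq (n : Int) : ∀ (f : Nat) (x : Int) (res : List Char),
    convertAux f x n res = res ++ digitsRec f x n
  | 0, x, res => by simp [convertAux, digitsRec]
  | f + 1, x, res => by
    unfold convertAux digitsRec
    split_ifs with hx
    · cases hdm : PySem.Int.divmod? x n with
      | none => simp
      | some qr =>
        cases hg : PySem.List.pyGet? pvNUMBERS.toList qr.2 with
        | none => simp [hg]
        | some c => simp [hg, convertAux_eq n f qr.1 (res ++ [c])]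
    · simp

theorem bDigitsAux_eq (n : Int) (hn : n ≠ 0) : ∀ (f : Nat) (x : Int) (ds : List Char),
    bDigitsAux f x n ds = (digitsRec f x n).reverse ++ ds
  | 0, x, ds => by simp [bDigitsAux, digitsRec]
  | f + 1, x, ds => by
    unfold bDigitsAux digitsRec
    have hdm : PySem.Int.divmod? x n = some (PySem.Int.floordiv x n, PySem.Int.mod x n) := by
      simp [PySem.Int.divmod?, PySem.Int.floordiv, PySem.Int.mod, hn]
    split_ifs with hx
    · rw [hdm]
      cases hg : PySem.List.pyGet? pvNUMBERS.toList (PySem.Int.mod x n) with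
      | none => simp [hg]
      | some c => simp [hg, bDigitsAux_eq n hn f (PySem.Int.floordiv x n) (c :: ds)]
    · simp

-- B's per-number digit chunk is exactly A's convert
theorem ds_eq_convert (n : Int) (hn : n ≠ 0) (num : Int) :
    (if num = 0 then ['0'] else bDigitsAux (num.toNat + 1) num n []) = convert num n := by
  unfold convert
  split_ifs with h
  · rfl
  · rw [bDigitsAux_eq n hn, convertAux_eq n]
    simp

theorem pyGet?_nonneg (xs : List Char) (i : Int) (h0 : 0 ≤ i) :
    PySem.List.pyGet? xs i = xs[i.toNat]? := by
  unfold PySem.List.pyGet? PySem.List.pyIdx?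
  simp only [h0, if_pos]
  split_ifs with h
  · simp
  · simp [List.getElem?_eq_none (by omega : xs.length ≤ i.toNat)]

-- the shapes of (n, x) on which NUMBERS[x % n] is a valid (possibly negative) index
def goodCase (n x : Int) : Prop :=
  (2 ≤ n ∧ n ≤ 16) ∨ (17 ≤ n ∧ x ≤ 15) ∨ (-17 ≤ n ∧ n ≤ -1)

theorem numbers_get_some (i : Int) (h1 : -16 ≤ i) (h2 : i ≤ 15) :
    ∃ c, PySem.List.pyGet? pvNUMBERS.toList i = some c := by
  have h : (PySem.List.pyGet? pvNUMBERS.toList i).isSome := by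
    interval_cases i <;> decide
  exact Option.isSome_iff_exists.mp h

theorem mod_idx_ok (n x : Int) (hx : 0 ≤ x) (hg : goodCase n x) :
    -16 ≤ PySem.Int.mod x n ∧ PySem.Int.mod x n ≤ 15 := by
  rcases hg with ⟨h2, h16⟩ | ⟨h17, hx15⟩ | ⟨hlo, hhi⟩
  · have := PySem.Int.mod_nonneg x (show 0 < n by omega)
    have := PySem.Int.mod_lt x (show 0 < n by omega)
    omega
  · have heq : PySem.Int.mod x n = x := by
      rw [PySem.Int.mod_eq_emod_of_pos (show (0:Int) < n by omega), Int.emod_eq_of_lt hx (by omega)]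
    omega
  · have := PySem.Int.mod_neg_bounds x (show n < 0 by omega)
    omega

theorem digitsRec_succ (n x : Int) (hg : goodCase n x) (hx : 0 < x) (f : Nat) :
    ∃ c, digitsRec (f + 1) x n = c :: digitsRec f (PySem.Int.floordiv x n) n := by
  have hn0 : n ≠ 0 := by rcases hg with ⟨h,_⟩|⟨h,_⟩|⟨_,h⟩ <;> omega
  have hdm : PySem.Int.divmod? x n = some (PySem.Int.floordiv x n, PySem.Int.mod x n) := by
    simp [PySem.Int.divmod?, PySem.Int.floordiv, PySem.Int.mod, hn0]
  obtain ⟨hm1, hm2⟩ := mod_idx_ok n x (by omega) hg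
  obtain ⟨c, hc⟩ := numbers_get_some (PySem.Int.mod x n) hm1 hm2
  refine ⟨c, ?_⟩
  conv_lhs => rw [digitsRec]
  rw [if_pos hx, hdm]
  simp [hc]

theorem convert_ne_nil (n x : Int) (hg : goodCase n x) (hx : 0 ≤ x) :
    convert x n ≠ [] := by
  unfold convert
  split_ifs with h
  · simp
  · obtain ⟨c, hc⟩ := digitsRec_succ n x hg (by omega) x.toNat
    rw [convertAux_eq n, hc]
    simp

-- length of the digit list = Nat.log + 1 (2 ≤ n ≤ 16)
theorem digitsRec_len (n : Int) (hn2 : 2 ≤ n) (hn16 : n ≤ 16) :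
    ∀ (f : Nat) (x : Int), 0 < x → x.toNat ≤ f →
    (digitsRec f x n).length = Nat.log n.toNat x.toNat + 1 := by
  intro f
  induction f with
  | zero => intro x hx hf; omega
  | succ f ih =>
    intro x hx hf
    obtain ⟨c, hc⟩ := digitsRec_succ n x (Or.inl ⟨hn2, hn16⟩) hx f
    rw [hc]
    have hq : PySem.Int.floordiv x n = x / n := PySem.Int.floordiv_eq_ediv_of_pos (by omega)
    by_cases hxn : x < n
    · have hq0 : PySem.Int.floordiv x n = 0 := by
        rw [hq, Int.ediv_eq_zero_of_lt (by omega) hxn]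
      have hz : digitsRec f 0 n = [] := by cases f <;> simp [digitsRec]
      rw [hq0, hz]
      have : Nat.log n.toNat x.toNat = 0 := Nat.log_eq_zero_iff.mpr (Or.inl (by omega))
      simp [this]
    · have hxnn : n ≤ x := by omega
      have hcast : (x / n).toNat = x.toNat / n.toNat := by
        have h1 : ((x.toNat / n.toNat : Nat) : Int) = ((x.toNat : Nat) : Int) / ((n.toNat : Nat) : Int) := by
          exact_mod_cast rfl
        have h2 : x / n = ((x.toNat / n.toNat : Nat) : Int) := by
          rw [h1]
          congr 1 <;> omega
        rw [h2]
        exact Int.toNat_natCast _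
      have hq1 : 1 ≤ x.toNat / n.toNat := (Nat.one_le_div_iff (by omega)).mpr (by omega)
      have hqlt : x.toNat / n.toNat < x.toNat := Nat.div_lt_self (by omega) (by omega)
      have hnn : 0 ≤ x / n := Int.ediv_nonneg (by omega) (by omega)
      have hih := ih (x / n) (by omega) (by omega)
      rw [hq]
      simp only [List.length_cons, hih, hcast, Nat.log_div_base]
      have hpos : 0 < Nat.log n.toNat x.toNat := Nat.log_pos (by omega) (by omega)
      omega

theorem convert_len (n : Int) (hn2 : 2 ≤ n) (hn16 : n ≤ 16) (x : Int) (hx : 0 ≤ x) :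
    (convert x n).length = Nat.log n.toNat x.toNat + 1 := by
  unfold convert
  split_ifs with h
  · simp [h]
  · rw [convertAux_eq n]
    simp [digitsRec_len n hn2 hn16 (x.toNat + 1) x (by omega) (by omega)]

-- the 62-term sum counts exactly Nat.log n k extra digits at step k (k ≤ 2^62)
theorem wordsLen_succ (n : Int) (hn2 : 2 ≤ n) (hn16 : n ≤ 16) (k : Nat) (hk : (k : Int) ≤ 2 ^ 62) :
    wordsLen n ((k : Int) + 1) = wordsLen n (k : Int) + 1 + (Nat.log n.toNat k : Int) := by
  set L := Nat.log n.toNat k with hL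
  have hL62 : L ≤ 62 := by
    have h1 : L ≤ Nat.log 2 k := Nat.log_anti_left (by omega) (by omega)
    have h2 : Nat.log 2 k ≤ 62 := by
      by_cases hk0 : k = 0
      · simp [hk0]
      · have hklt : k < 2 ^ 63 := by push_cast at hk; omega
        exact Nat.lt_succ_iff.mp (Nat.log_lt_of_lt_pow hk0 hklt)
    omega
  have hterm : ∀ j ∈ Finset.Icc 1 62,
      max ((k : Int) + 1 - n ^ j) 0 = max ((k : Int) - n ^ j) 0 + (if j ≤ L then 1 else 0) := by
    intro j hj
    simp only [Finset.mem_Icc] at hj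
    have hiff : n ^ j ≤ (k : Int) ↔ j ≤ L := by
      have hcast : (n ^ j : Int) = ((n.toNat ^ j : Nat) : Int) := by
        push_cast
        rw [Int.toNat_of_nonneg (by omega)]
      by_cases hk0 : k = 0
      · subst hk0
        constructor
        · intro h
          exfalso
          have : (0:Int) < n ^ j := by positivity
          omega
        · intro h
          simp [hL, Nat.log_zero_right] at h
          omega
      · rw [hcast, Int.ofNat_le]
        exact (Nat.le_log_iff_pow_le (by omega) hk0).symm
    by_cases hle : j ≤ L
    · have hnk : n ^ j ≤ (k : Int) := hiff.mpr hle
      simp [hle]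
      omega
    · have hnk : (k : Int) < n ^ j := by
        by_contra hcon
        exact hle (hiff.mp (by omega))
      simp [hle]
      omega
  unfold wordsLen
  rw [Finset.sum_congr rfl hterm, Finset.sum_add_distrib]
  have hfilter : (Finset.Icc 1 62).filter (fun j => j ≤ L) = Finset.Icc 1 L := by
    ext j
    simp [Finset.mem_Icc, Finset.mem_filter]
    omega
  have hcount : (∑ j ∈ Finset.Icc 1 62, (if j ≤ L then (1 : Int) else 0)) = (L : Int) := by
    rw [Finset.sum_boole, hfilter, Nat.card_Icc]
    simp
  rw [hcount]
  ring

theorem streamN_len_ge (n : Int) (k : Nat)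
    (hcase : (2 ≤ n ∧ n ≤ 16) ∨ (17 ≤ n ∧ (k : Int) ≤ 16) ∨ (-17 ≤ n ∧ n ≤ -1)) :
    k ≤ (streamN n k).length := by
  induction k with
  | zero => simp [streamN]
  | succ k ih =>
    have hg : goodCase n (k : Int) := by
      rcases hcase with h | ⟨h17, hk16⟩ | h
      · exact Or.inl h
      · exact Or.inr (Or.inl ⟨h17, by omega⟩)
      · exact Or.inr (Or.inr h)
    have h1 : 1 ≤ (convert (k : Int) n).length :=
      List.length_pos_iff.mpr (convert_ne_nil n k hg (by positivity))
    have hsucc : streamN n (k + 1) = streamN n k ++ convert (k : Int) n := by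
      simp [streamN, List.range_succ]
    have hih : k ≤ (streamN n k).length := by
      apply ih
      rcases hcase with h | ⟨h17, hk16⟩ | h
      · exact Or.inl h
      · exact Or.inr (Or.inl ⟨h17, by omega⟩)
      · exact Or.inr (Or.inr h)
    rw [hsucc, List.length_append]
    omega

-- exact length of A's words (2 ≤ n ≤ 16, k ≤ 2^62)
theorem streamN_len_exact (n : Int) (hn2 : 2 ≤ n) (hn16 : n ≤ 16) :
    ∀ (k : Nat), (k : Int) ≤ 2 ^ 62 → ((streamN n k).length : Int) = wordsLen n (k : Int) := by
  intro k
  induction k with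
  | zero =>
    intro _
    unfold wordsLen
    rw [Finset.sum_eq_zero]
    · simp [streamN]
    · intro j hj
      simp only [Finset.mem_Icc] at hj
      have : (0:Int) < n ^ j := by positivity
      simp
      omega
  | succ k ih =>
    intro hk
    have hsucc : streamN n (k + 1) = streamN n k ++ convert (k : Int) n := by
      simp [streamN, List.range_succ]
    have hcl := convert_len n hn2 hn16 (k : Int) (by positivity)
    have hk' : (k : Int) ≤ 2 ^ 62 := by push_cast at hk ⊢; omega
    have hws := wordsLen_succ n hn2 hn16 k hk'
    have htn : ((k : Int).toNat) = k := Int.toNat_natCast k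
    rw [hsucc, List.length_append, hcl, htn]
    push_cast
    rw [ih hk', hws]
    ring

theorem streamN_prefix (n : Int) (k k' : Nat) (h : k ≤ k') :
    streamN n k <+: streamN n k' := by
  obtain ⟨d, rfl⟩ := Nat.exists_eq_add_of_le h
  refine ⟨((List.range d).map (k + ·)).flatMap (fun i => convert (i : Int) n), ?_⟩
  simp [streamN, List.range_add, List.flatMap_append]

theorem flatMap_cast (f : Int → List Char) (l : List Nat) :
    List.flatMap f (List.flatMap (fun a => [((a : Nat) : Int)]) l) = List.flatMap (fun a => f ((a : Nat) : Int)) l := by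
  induction l with
  | nil => simp
  | cons x xs ih => simp [ih]

theorem wordsA_eq (n t m : Int) : wordsA n t m = streamN n (t * m).toNat := by
  unfold wordsA
  rw [PySem.List.pyRange_one]
  rw [PySem.List.foldl_append_eq_flatMap]
  simp [streamN, List.flatMap_map]
  exact (flatMap_cast (fun num => convert num n) _).symm

theorem sel_snoc (W : List Char) (m pos : Int) (k : Nat) :
    sel W m pos (k + 1) = sel W m pos k ++ [PySem.List.pyGetD W (pos + (k : Int) * m) ' '] := by
  induction k generalizing pos with
  | zero => simp [sel]
  | succ k ih =>
    rw [show sel W m pos (k + 1 + 1) = PySem.List.pyGetD W pos ' ' :: sel W m (pos + m) (k + 1) from rfl,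
        ih (pos + m)]
    have : pos + m + (k : Int) * m = pos + ((k : Nat) + 1 : Int) * m := by ring
    simp [sel, this]


theorem aLoop_sel (W : List Char) (t m : Int) : ∀ (k : Nat) (ans : List Char) (pos : Int),
    ((ans.length : Int) + k = t) →
    (∀ j : Nat, j < k → 0 ≤ pos + (j : Int) * m ∧ (pos + (j : Int) * m).toNat < W.length) →
    aLoop (k + 1) W ans t pos m = ans ++ sel W m pos k := by
  intro k
  induction k with
  | zero =>
    intro ans pos hlen _
    unfold aLoop
    rw [if_pos (by push_cast at hlen; omega)]
    simp [sel]
  | succ k ih =>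
    intro ans pos hlen hr
    have h0 := hr 0 (Nat.succ_pos k)
    simp only [Nat.cast_zero, zero_mul, add_zero] at h0
    obtain ⟨hpos0, hltW⟩ := h0
    have hltW' : pos < (W.length : Int) := by omega
    unfold aLoop
    rw [if_neg (by push_cast at hlen; omega)]
    have hget : PySem.List.pyGet? W pos = some (W[pos.toNat]) := by
      rw [pyGet?_nonneg _ _ hpos0]
      exact List.getElem?_eq_getElem hltW
    rw [hget]
    show aLoop (k + 1) W (ans ++ [W[pos.toNat]]) t (pos + m) m = ans ++ sel W m pos (k + 1)
    rw [ih (ans ++ [W[pos.toNat]]) (pos + m)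
        (by push_cast at hlen ⊢; simp; omega)
        (by
          intro j hj
          have h2 := hr (j + 1) (by omega)
          have he : pos + m + (j : Int) * m = pos + ((j : Nat) + 1 : Int) * m := by ring
          push_cast at h2 ⊢
          rw [he]
          exact h2)]
    have hD : PySem.List.pyGetD W pos ' ' = W[pos.toNat] :=
      PySem.List.pyGetD_eq_getElem W ' ' hpos0 hltW'
    rw [show sel W m pos (k + 1) = PySem.List.pyGetD W pos ' ' :: sel W m (pos + m) k from rfl, hD]
    simp

-- invariant step for B's inner for-loop
theorem bInner_spec (W : List Char) (start t m : Int) (hm : 1 ≤ m) (_ht : 1 ≤ t) :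
    ∀ (cs res : List Char) (want idx : Int) (rest : List Char),
    ((res.length : Int) < t) →
    res = sel W m start res.length →
    want = start + (res.length : Int) * m →
    0 ≤ idx → idx ≤ want →
    W.drop idx.toNat = cs ++ rest →
    ((∀ done, bInner cs res want idx t m = Sum.inl done → done = sel W m start t.toNat) ∧
     (∀ res' want' idx', bInner cs res want idx t m = Sum.inr (res', want', idx') →
        ((res'.length : Int) < t ∧ res' = sel W m start res'.length ∧
         want' = start + (res'.length : Int) * m ∧ idx' = idx + cs.length ∧ idx' ≤ want'))) := by
  intro cs
  induction cs with
  | nil =>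
    intro res want idx rest hlt hres hwant hidx0 hle hdrop
    refine ⟨fun done h => by simp [bInner] at h, fun res' want' idx' h => ?_⟩
    simp only [bInner, Sum.inr.injEq, Prod.mk.injEq] at h
    obtain ⟨h1, h2, h3⟩ := h
    subst h1; subst h2; subst h3
    exact ⟨hlt, hres, hwant, by simp, hle⟩
  | cons c cs' ih =>
    intro res want idx rest hlt hres hwant hidx0 hle hdrop
    have hgetc : W[idx.toNat]? = some c := by
      have h0 : (W.drop idx.toNat)[0]? = W[idx.toNat + 0]? := List.getElem?_drop
      rw [hdrop] at h0
      simpa using h0.symm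
    have hidxlen : idx.toNat < W.length := by
      obtain ⟨h, -⟩ := List.getElem?_eq_some_iff.mp hgetc
      exact h
    have hdrop' : W.drop (idx.toNat + 1) = cs' ++ rest := by
      have h1 : W.drop (idx.toNat + 1) = (W.drop idx.toNat).drop 1 := by
        rw [List.drop_drop]
      rw [h1, hdrop]
      simp
    have htn : (idx + 1).toNat = idx.toNat + 1 := by omega
    by_cases heq : idx = want
    · -- pick this character
      have hc : W[idx.toNat] = c := by
        have := List.getElem?_eq_getElem hidxlen
        rw [hgetc] at this
        exact (Option.some.injEq _ _ ▸ this.symm :)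
      have hres1 : res ++ [c] = sel W m start (res.length + 1) := by
        rw [sel_snoc, ← hwant, ← heq,
            PySem.List.pyGetD_eq_getElem W ' ' hidx0 (by omega), hc, ← hres]
      by_cases hfull : ((res ++ [c]).length : Int) = t
      · -- returns inl (res ++ [c])
        have hbi : bInner (c :: cs') res want idx t m = Sum.inl (res ++ [c]) := by
          simp only [bInner]
          rw [if_pos heq, if_pos hfull]
        refine ⟨fun done h => ?_, fun res' want' idx' h => ?_⟩
        · rw [hbi] at h
          cases h
          rw [hres1]
          congr 1
          simp at hfull
          omega
        · rw [hbi] at h; cases h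
      · have hbi : bInner (c :: cs') res want idx t m
            = bInner cs' (res ++ [c]) (want + m) (idx + 1) t m := by
          simp only [bInner]
          rw [if_pos heq, if_neg hfull]
        have hspec := ih (res ++ [c]) (want + m) (idx + 1) rest
          (by simp at hfull ⊢; omega)
          (by simpa using hres1)
          (by simp only [List.length_append, List.length_cons, List.length_nil]
              push_cast
              rw [hwant]; ring)
          (by omega)
          (by omega)
          (htn ▸ hdrop')
        refine ⟨fun done h => ?_, fun res' want' idx' h => ?_⟩
        · exact hspec.1 done (by rw [← hbi]; exact h)
        · obtain ⟨a1, a2, a3, a4, a5⟩ := hspec.2 res' want' idx' (by rw [← hbi]; exact h)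
          exact ⟨a1, a2, a3, by simp at a4 ⊢; omega, a5⟩
    · -- skip this character
      have hlt' : idx < want := lt_of_le_of_ne hle heq
      have hbi : bInner (c :: cs') res want idx t m
          = bInner cs' res want (idx + 1) t m := by
        simp only [bInner]
        rw [if_neg heq]
      have hspec := ih res want (idx + 1) rest hlt hres hwant (by omega) (by omega)
        (htn ▸ hdrop')
      refine ⟨fun done h => ?_, fun res' want' idx' h => ?_⟩
      · exact hspec.1 done (by rw [← hbi]; exact h)
      · obtain ⟨a1, a2, a3, a4, a5⟩ := hspec.2 res' want' idx' (by rw [← hbi]; exact h)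
        exact ⟨a1, a2, a3, by simp at a4 ⊢; omega, a5⟩

theorem bLoop_sel (n t m p : Int) (hn0 : n ≠ 0) (ht : 1 ≤ t) (hm : 1 ≤ m)
    (hreach : p - 1 + (t - 1) * m < ((streamN n (t * m).toNat).length : Int)) :
    ∀ (f : Nat) (k : Nat) (res : List Char) (want idx : Int),
    ((res.length : Int) < t) →
    res = sel (streamN n (t*m).toNat) m (p-1) res.length →
    want = (p-1) + (res.length : Int) * m →
    idx = ((streamN n k).length : Int) →
    idx ≤ want →
    (t*m).toNat ≤ k + f →
    bLoop f (k : Int) res want idx n t m = sel (streamN n (t*m).toNat) m (p-1) t.toNat := by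
  intro f
  induction f with
  | zero =>
    intro k res want idx hlt hres hwant hidx hle hfuel
    exfalso
    have h1 : (res.length : Int) ≤ t - 1 := by omega
    have h2 : (res.length : Int) * m ≤ (t - 1) * m := by nlinarith
    have hwb : want < ((streamN n (t * m).toNat).length : Int) := by nlinarith
    have hmono : (streamN n (t * m).toNat).length ≤ (streamN n k).length :=
      (streamN_prefix n (t * m).toNat k (by omega)).length_le
    omega
  | succ f ihf =>
    intro k res want idx hlt hres hwant hidx hle hfuel
    have h1 : (res.length : Int) ≤ t - 1 := by omega
    have h2 : (res.length : Int) * m ≤ (t - 1) * m := by nlinarith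
    have hwb : want < ((streamN n (t * m).toNat).length : Int) := by nlinarith
    have hkM : k < (t * m).toNat := by
      by_contra hge
      have hmono : (streamN n (t * m).toNat).length ≤ (streamN n k).length :=
        (streamN_prefix n (t * m).toNat k (by omega)).length_le
      omega
    have hidx0 : 0 ≤ idx := by omega
    have hsucc : streamN n (k + 1) = streamN n k ++ convert (k : Int) n := by
      simp [streamN, List.range_succ]
    obtain ⟨rest, hWdrop⟩ :
        ∃ rest, (streamN n (t * m).toNat).drop idx.toNat = convert (k : Int) n ++ rest := by
      obtain ⟨r2, hpre⟩ := streamN_prefix n (k + 1) (t * m).toNat (by omega)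
      refine ⟨r2, ?_⟩
      have hW : streamN n (t * m).toNat = streamN n k ++ (convert (k : Int) n ++ r2) := by
        rw [← hpre, hsucc, List.append_assoc]
      have htoNat : idx.toNat = (streamN n k).length := by omega
      rw [hW, htoNat, List.drop_left]
    have hds := ds_eq_convert n hn0 (k : Int)
    have hspec := bInner_spec (streamN n (t * m).toNat) (p - 1) t m hm ht
      (convert (k : Int) n) res want idx rest hlt hres hwant hidx0 hle hWdrop
    simp only [bLoop]
    rw [show ((k : Int).toNat + 1) = k + 1 from by omega] at hds ⊢
    rw [hds]
    cases hmatch : bInner (convert (k : Int) n) res want idx t m with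
    | inl done =>
      exact hspec.1 done hmatch
    | inr st =>
      show bLoop f ((k : Int) + 1) st.1 st.2.1 st.2.2 n t m
          = sel (streamN n (t * m).toNat) m (p - 1) t.toNat
      obtain ⟨a1, a2, a3, a4, a5⟩ := hspec.2 st.1 st.2.1 st.2.2 (by rw [hmatch])
      rw [show ((k : Int) + 1) = ((k + 1 : Nat) : Int) from by push_cast; ring]
      apply ihf (k + 1) st.1 st.2.1 st.2.2 a1 a2 a3 ?_ a5 (by omega)
      rw [a4, hidx, hsucc]
      push_cast [List.length_append]
      ring

theorem main_core (n t m p : Int) (hn0 : n ≠ 0) (ht : 1 ≤ t) (hm : 1 ≤ m) (hp1 : 1 ≤ p)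
    (hreach : p - 1 + (t - 1) * m < ((streamN n (t * m).toNat).length : Int)) :
    String.ofList (aLoop (t.toNat + 1) (wordsA n t m) [] t (p - 1) m)
      = if t ≤ 0 then ""
        else String.ofList (bLoop ((p - 1).toNat + t.toNat * m.toNat + 1) 0 [] (p - 1) 0 n t m) := by
  have htm1 : 1 ≤ t * m := by nlinarith
  rw [if_neg (by omega), wordsA_eq]
  have hA : aLoop (t.toNat + 1) (streamN n (t * m).toNat) [] t (p - 1) m
      = [] ++ sel (streamN n (t * m).toNat) m (p - 1) t.toNat := by
    apply aLoop_sel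
    · simp; omega
    · intro j hj
      have hj' : (j : Int) ≤ t - 1 := by omega
      have hjm : (j : Int) * m ≤ (t - 1) * m := by nlinarith
      have hub : p - 1 + (j : Int) * m < ((streamN n (t * m).toNat).length : Int) := by nlinarith
      have hlb : 0 ≤ p - 1 + (j : Int) * m := by
        have : (0 : Int) ≤ (j : Int) * m := by positivity
        omega
      exact ⟨hlb, by omega⟩
  have htmN : ((t.toNat * m.toNat : Nat) : Int) = t * m := by
    push_cast
    rw [Int.toNat_of_nonneg (by omega), Int.toNat_of_nonneg (by omega)]
  have hB : bLoop ((p - 1).toNat + t.toNat * m.toNat + 1) ((0 : Nat) : Int) [] (p - 1) 0 n t m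
      = sel (streamN n (t * m).toNat) m (p - 1) t.toNat := by
    apply bLoop_sel n t m p hn0 ht hm hreach ((p - 1).toNat + t.toNat * m.toNat + 1) 0
    · simp; omega
    · rfl
    · simp
    · simp [streamN]
    · omega
    · omega
  rw [hA]
  rw [show ((0 : Nat) : Int) = (0 : Int) from rfl] at hB
  rw [hB]
  simp

-- the trivial region t = m = p = 1: both sides compute "0" for every n
theorem trivial_case (n : Int) : solution n 1 1 1 = solution_alt n 1 1 1 := by
  have hw : wordsA n 1 1 = ['0'] := by
    simp [wordsA, PySem.List.pyRange_one, convert]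
  simp [solution, solution_alt, hw, aLoop, bLoop, bInner]

-- ===== VERDICT (by name: the statement is the Claim_ definition above) =====
theorem solution_spec : Claim_equal_solution := by
  intro n t m p hdom hpre
  unfold Spec_solution
  rcases hpre with ht0 | ⟨ht1, hm1, hp1'⟩ | ⟨hn2, hn16, ht, hm, hp1, hbound⟩
    | ⟨h17, htm16, ht, hm, hp1, hpm⟩ | ⟨hlo, hhi, ht, hm, hp1, hpm⟩
  · subst ht0
    unfold solution solution_alt
    simp only [le_refl, if_pos]
    norm_num [aLoop]
  · subst ht1; subst hm1; subst hp1'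
    exact trivial_case n
  · unfold solution solution_alt
    have htm1 : 1 ≤ t * m := by nlinarith
    have hbd : Dom_solution n t m p := hdom
    have htb : t ≤ 2147483648 ∧ m ≤ 2147483648 := by
      unfold Dom_solution pvDomInt at hbd
      simp at hbd
      omega
    have htm62 : t * m ≤ 2 ^ 62 := by nlinarith [htb.1, htb.2, ht, hm]
    have hMint : (((t * m).toNat : Nat) : Int) = t * m := by omega
    have hlen : ((streamN n (t * m).toNat).length : Int) = wordsLen n (t * m) := by
      have h := streamN_len_exact n hn2 hn16 (t * m).toNat (by omega)
      rw [hMint] at h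
      exact h
    exact main_core n t m p (by omega) ht hm hp1 (by omega)
  · unfold solution solution_alt
    have htm1 : 1 ≤ t * m := by nlinarith
    have hMint : (((t * m).toNat : Nat) : Int) = t * m := by omega
    have hlen : ((t * m).toNat : Int) ≤ ((streamN n (t * m).toNat).length : Int) := by
      exact_mod_cast streamN_len_ge n (t * m).toNat (Or.inr (Or.inl ⟨h17, by omega⟩))
    exact main_core n t m p (by omega) ht hm hp1 (by rw [hMint] at hlen; omega)
  · unfold solution solution_alt
    have htm1 : 1 ≤ t * m := by nlinarith
    have hMint : (((t * m).toNat : Nat) : Int) = t * m := by omega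
    have hlen : ((t * m).toNat : Int) ≤ ((streamN n (t * m).toNat).length : Int) := by
      exact_mod_cast streamN_len_ge n (t * m).toNat (Or.inr (Or.inr ⟨hlo, hhi⟩))
    exact main_core n t m p (by omega) ht hm hp1 (by rw [hMint] at hlen; omega)
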